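-- pv_equiv track=rewrite | github.com/LuizFillip/RINEXplorer | src/rinex2/observables.py | get_data_rows
-- ===== SOURCE A (Python) =====
-- def get_length(num_of_obs):
--
--     if  num_of_obs < 6:
--         length = 1
--     elif (num_of_obs >= 6) and (num_of_obs < 11):
--         length = 2
--     elif (num_of_obs >= 11) and (num_of_obs <= 16):
--         length = 3
--     elif (num_of_obs > 16) and (num_of_obs <= 20):
--         length = 4
--     else:
--         length = 5
--
--     return length
--
-- def get_data_rows(data, time_prns, num_of_obs):
--     length = get_length(num_of_obs)
--     start = 0
--     out = []
--
--     for p in list(time_prns.values()):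
--
--         n_sats = len(p) * length
--         slice_data = data[start: start + n_sats]
--
--         for index in range(0, len(slice_data), length):
--             item = ''.join(slice_data[index: index + length])
--             out.append(item)
--
--         start += n_sats
--
--     return out
-- ===== SOURCE B (Python) =====
-- def get_length(num_of_obs):
--     return 1 + sum(num_of_obs >= t for t in (6, 11, 17, 21))
--
-- def get_data_rows(data, time_prns, num_of_obs):
--     # The per-satellite grouping never changes the output: the groups tile the
--     # data contiguously, so consume the data front-to-back, one chunk per
--     # expected record, stopping when records or data run out.
--     length = get_length(num_of_obs)
--     count = sum(len(p) for p in time_prns.values())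
--     out = []
--     i = 0
--     while count and i < len(data):
--         out.append(''.join(data[i:i + length]))
--         i += length
--         count -= 1
--     return out
-- ===== Notes on version B (the rewrite author's own statement) =====
-- stated objective: simpler
-- what changed: Replaces the nested group-then-chunk loops with start/slice bookkeeping by a single front-to-back consumption of the data, one length-sized chunk per expected record (records counted once up front), stopping when records or data run out; get_length becomes a threshold count instead of an if-chain.
import Mathlib
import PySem

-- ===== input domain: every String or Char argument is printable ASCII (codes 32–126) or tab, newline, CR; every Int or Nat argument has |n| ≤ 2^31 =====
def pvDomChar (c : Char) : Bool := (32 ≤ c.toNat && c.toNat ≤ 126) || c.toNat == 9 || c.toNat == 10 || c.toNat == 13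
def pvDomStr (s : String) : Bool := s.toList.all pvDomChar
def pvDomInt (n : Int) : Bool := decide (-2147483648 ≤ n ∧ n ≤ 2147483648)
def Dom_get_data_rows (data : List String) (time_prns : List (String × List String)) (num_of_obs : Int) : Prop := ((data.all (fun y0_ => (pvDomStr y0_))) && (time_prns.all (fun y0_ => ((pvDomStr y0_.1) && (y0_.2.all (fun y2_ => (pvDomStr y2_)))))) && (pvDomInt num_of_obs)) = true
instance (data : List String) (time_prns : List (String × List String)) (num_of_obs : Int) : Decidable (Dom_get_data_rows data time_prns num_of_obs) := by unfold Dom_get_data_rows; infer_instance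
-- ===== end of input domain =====

-- B consumes the data front-to-back, one length-sized chunk per expected record
-- (records counted once up front), replacing A's nested group-then-chunk loops
-- with start bookkeeping; objective: simpler.

-- ===== PORT A =====
def get_length (num_of_obs : Int) : Int :=
  if num_of_obs < 6 then 1
  else if 6 ≤ num_of_obs ∧ num_of_obs < 11 then 2
  else if 11 ≤ num_of_obs ∧ num_of_obs ≤ 16 then 3
  else if 16 < num_of_obs ∧ num_of_obs ≤ 20 then 4
  else 5

def get_data_rows (data : List String) (time_prns : List (String × List String)) (num_of_obs : Int) : List String :=
  let length := get_length num_of_obs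
  let st := ((PySem.Dict.mk time_prns).values).foldl
    (fun (st : Int × List String) p =>
      let n_sats := (PySem.List.len p) * length
      let slice_data := PySem.List.slice data (some st.1) (some (st.1 + n_sats))
      let out := (PySem.List.pyRange 0 (PySem.List.len slice_data) length).foldl
        (fun acc index => acc ++ [PySem.Str.join "" (PySem.List.slice slice_data (some index) (some (index + length)))]) st.2
      (st.1 + n_sats, out))
    (0, [])
  st.2

-- ===== PORT B =====
-- get_length: 1 + number of thresholds reached (a count, not an if-chain)
def get_length_b (num_of_obs : Int) : Nat :=
  1 + (([6, 11, 17, 21] : List Int).map (fun t => if t ≤ num_of_obs then 1 else 0)).sum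

-- B's while loop: recursion on the remaining record count, advancing index i
-- (data[i:i+l] with 0 ≤ i is exactly (data.drop i).take l)
def pvTakeChunks (data : List String) (l : Nat) : Nat → Nat → List String
  | _, 0 => []
  | i, Nat.succ n =>
      if i < data.length then
        PySem.Str.join "" ((data.drop i).take l) :: pvTakeChunks data l (i+l) n
      else []

def get_data_rows_alt (data : List String) (time_prns : List (String × List String)) (num_of_obs : Int) : List String :=
  let length := get_length_b num_of_obs
  let count := (((PySem.Dict.mk time_prns).values).map List.length).sum
  pvTakeChunks data length 0 count

-- ===== PRECONDITION & SPEC =====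
def Spec_get_data_rows (data : List String) (time_prns : List (String × List String)) (num_of_obs : Int) (out : List String) : Prop := out = get_data_rows_alt data time_prns num_of_obs
instance (data : List String) (time_prns : List (String × List String)) (num_of_obs : Int) (out : List String) : Decidable (Spec_get_data_rows data time_prns num_of_obs out) := by unfold Spec_get_data_rows; infer_instance

-- ===== CLAIM (what is proved, stated in full; the proofs are below) =====
def Claim_equal_get_data_rows : Prop := ∀ (data : List String) (time_prns : List (String × List String)) (num_of_obs : Int), Dom_get_data_rows data time_prns num_of_obs → Spec_get_data_rows data time_prns num_of_obs (get_data_rows data time_prns num_of_obs)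

-- ===== LEMMAS AND PROOFS =====

-- the k-th length-sized chunk of data, joined
def pvChunk (data : List String) (l k : Nat) : String :=
  PySem.Str.join "" ((data.drop (l*k)).take l)

theorem pv_len_b (n : Int) : 0 < get_length_b n ∧ ((get_length_b n : Nat) : Int) = get_length n := by
  unfold get_length get_length_b
  simp only [List.map_cons, List.map_nil, List.sum_cons, List.sum_nil]
  split_ifs <;> simp_all <;> omega

-- ceil-division count, Nat form
theorem pv_ceil_toNat (s l : Nat) (hl : 0 < l) :
    (if (0:Int) < (s:Int) then (((s:Int) - 0 + (l:Int) - 1)/(l:Int)).toNat else 0) = (s + l - 1)/l := by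
  by_cases hs : s = 0
  · subst hs
    simp [Nat.div_eq_of_lt (show l - 1 < l by omega)]
  · rw [if_pos (by exact_mod_cast Nat.pos_of_ne_zero hs)]
    have h1 : ((s:Int) - 0 + (l:Int) - 1) = (((s + l - 1 : Nat)) : Int) := by omega
    rw [h1, ← Int.natCast_div, Int.toNat_natCast]

-- the core count identity
theorem pv_count_eq (l m p L : ℕ) (hl : 0 < l) :
    ((min (l*m + l*p) L - min (l*m) L) + l - 1)/l
      = min (m+p) ((L + l - 1)/l) - min m ((L + l - 1)/l) := by
  set cL := (L + l - 1)/l with hcL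
  rcases le_or_gt L (l*m) with h1 | h1
  · have hcLm : cL ≤ m := by
      rw [hcL, Nat.div_le_iff_le_mul_add_pred hl]; omega
    have e1 : min (l*m + l*p) L = L := by omega
    have e2 : min (l*m) L = L := by omega
    rw [e1, e2]
    have e3 : L - L + l - 1 = l - 1 := by omega
    rw [e3, Nat.div_eq_of_lt (by omega)]
    omega
  · have hmcL : m < cL := by
      by_contra hc
      push Not at hc
      rw [hcL, Nat.div_le_iff_le_mul_add_pred hl] at hc
      omega
    rcases le_or_gt (l*m + l*p) L with h2 | h2
    · have hpc : m + p ≤ cL := by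
        have hle : l*(m+p) ≤ L := by rw [Nat.mul_add]; omega
        have h3 : (l*(m+p) + l - 1)/l ≤ cL := by
          apply Nat.div_le_div_right; omega
        have h4 : (l*(m+p) + l - 1)/l = (m+p) + (l-1)/l := by
          have h7 := Nat.mul_add_div hl (m+p) (l-1)
          rw [← h7]; congr 1; omega
        rw [Nat.div_eq_of_lt (show l-1 < l by omega)] at h4
        omega
      have e1 : min (l*m + l*p) L = l*m + l*p := by omega
      have e2 : min (l*m) L = l*m := by omega
      rw [e1, e2]
      have e3 : l*m + l*p - (l*m) + l - 1 = l*p + (l-1) := by omega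
      rw [e3, Nat.mul_add_div hl, Nat.div_eq_of_lt (show l-1 < l by omega)]
      omega
    · have hpc : cL ≤ m + p := by
        rw [hcL, Nat.div_le_iff_le_mul_add_pred hl, Nat.mul_add]; omega
      have e1 : min (l*m + l*p) L = L := by omega
      have e2 : min (l*m) L = l*m := by omega
      rw [e1, e2]
      have h6 : L - l*m + l - 1 = (L + l - 1) - l*m := by omega
      rw [h6, Nat.sub_mul_div]
      omega

-- B side: the chunk-consuming recursion yields exactly the chunk list
theorem pv_B_chunks (l : Nat) (hl : 0 < l) (data : List String) :
    ∀ (n m : Nat), pvTakeChunks data l (l*m) n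
      = (List.range (min n ((data.length + l - 1)/l - m))).map (fun k => pvChunk data l (m+k)) := by
  intro n
  induction n with
  | zero => intro m; simp [pvTakeChunks]
  | succ n ih =>
    intro m
    set cL := (data.length + l - 1)/l with hcL
    by_cases he : data.length ≤ l*m
    · have hcm : cL ≤ m := by rw [hcL, Nat.div_le_iff_le_mul_add_pred hl]; omega
      rw [pvTakeChunks, if_neg (by omega)]
      simp [show min (n+1) (cL - m) = 0 by omega]
    · have he' : l*m < data.length := by omega
      have hcm : m < cL := by
        by_contra hc
        push Not at hc
        rw [hcL, Nat.div_le_iff_le_mul_add_pred hl] at hc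
        omega
      rw [pvTakeChunks, if_pos he']
      have h8 : l * m + l = l * (m + 1) := by ring
      rw [h8, ih (m+1)]
      have hmin : min (n+1) (cL - m) = (min n (cL - (m+1))) + 1 := by omega
      rw [hmin, List.range_succ_eq_map, List.map_cons, List.map_map]
      have htail : ∀ k, ((fun k => pvChunk data l (m+k)) ∘ Nat.succ) k = pvChunk data l (m+1+k) := by
        intro k
        have h9 : m + Nat.succ k = m + 1 + k := by omega
        simp only [Function.comp_apply, h9]
      rw [List.map_congr_left (fun k _ => htail k)]
      simp [pvChunk]

-- one element of an inner chunk loop (A side)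
theorem pv_A_elem (data : List String) (l m pl k : Nat) (_hl : 0 < l) (hk : k < pl) :
    PySem.Str.join "" (PySem.List.slice ((data.drop (l*m)).take (l*pl)) (some ((0:Int) + (l:Int)*(k:Nat))) (some ((0:Int) + (l:Int)*(k:Nat) + (l:Int))))
      = pvChunk data l (m + k) := by
  unfold pvChunk
  have h1 : (0:Int) + (l:Int)*(k:Nat) = ((l*k : Nat) : Int) := by push_cast; ring
  rw [h1, PySem.List.slice_natCast_add]
  congr 1
  rw [List.drop_take, List.take_take, List.drop_drop]
  have h3 : l*pl - l*k = l*(pl-k) := (Nat.mul_sub l pl k).symm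
  have h2 : l * 1 <= l * (pl - k) := Nat.mul_le_mul_left l (by omega)
  have h4 : min l (l*pl - l*k) = l := by omega
  have h6 : l*m + l*k = l*(m+k) := by
    have h5 : l*(m+k) = l*m + l*k := Nat.mul_add l m k
    omega
  rw [h4, h6]

-- one group step of A's outer loop
theorem pv_A_step (data : List String) (l : Nat) (hl : 0 < l) (p : List String) (m : Nat) :
    ((PySem.List.pyRange 0 (PySem.List.len (PySem.List.slice data (some ((l*m : Nat) : Int)) (some (((l*m : Nat) : Int) + (PySem.List.len p) * (l:Int))))) (l:Int)).foldl
       (fun acc index => acc ++ [PySem.Str.join "" (PySem.List.slice (PySem.List.slice data (some ((l*m:Nat):Int)) (some (((l*m:Nat):Int) + (PySem.List.len p) * (l:Int)))) (some index) (some (index + (l:Int))))])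
       ((List.range (min m ((data.length + l - 1)/l))).map (pvChunk data l)))
    = (List.range (min (m + p.length) ((data.length + l - 1)/l))).map (pvChunk data l) := by
  have e1 : ((l*m:Nat):Int) + (PySem.List.len p) * (l:Int)
      = ((l*m : Nat) : Int) + ((l*p.length : Nat) : Int) := by
    simp [PySem.List.len_eq]; ring
  rw [e1, PySem.List.slice_natCast_add]
  simp only [PySem.List.len_eq]
  have hsd : ((data.drop (l*m)).take (l*p.length)).length
      = min (l*m + l*p.length) data.length - min (l*m) data.length := by
    simp [List.length_take, List.length_drop]; omega
  rw [hsd, PySem.List.foldl_append_singleton_eq_map,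
      PySem.List.pyRange_of_pos _ _ (show (0:Int) < (l:Int) by exact_mod_cast hl),
      pv_ceil_toNat _ l hl, pv_count_eq l m p.length data.length hl, List.map_map]
  rcases le_or_gt ((data.length + l - 1)/l) m with hcm | hcm
  · have h2 : min (m + p.length) ((data.length + l - 1)/l) - min m ((data.length + l - 1)/l) = 0 := by omega
    have h3 : min (m + p.length) ((data.length + l - 1)/l) = min m ((data.length + l - 1)/l) := by omega
    rw [h2, h3]
    simp
  · have hm : min m ((data.length + l - 1)/l) = m := by omega
    rw [hm]
    set c := min (m + p.length) ((data.length + l - 1) / l) - m with hc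
    have hsum : min (m + p.length) ((data.length + l - 1) / l) = m + c := by rw [hc]; omega
    rw [hsum, List.range_add, List.map_append, List.map_map]
    congr 1
    apply List.map_congr_left
    intro k hk
    simp only [Function.comp_apply]
    have hk2 : k < p.length := by
      have h8 := List.mem_range.mp hk
      rw [hc] at h8
      omega
    exact pv_A_elem data l m p.length k hl hk2

theorem pv_A_start (l m : Nat) (p : List String) :
    ((l*m:Nat):Int) + (PySem.List.len p) * (l:Int) = ((l*(m+p.length) : Nat) : Int) := by
  simp [PySem.List.len_eq]; ring

-- A's outer loop produces the chunk list
theorem pv_A_loop (data : List String) (l : Nat) (hl : 0 < l) (ps : List (List String)) :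
    ∀ (m : Nat),
    (ps.foldl (fun (st : Int × List String) p =>
        (st.1 + (PySem.List.len p) * (l:Int),
         (PySem.List.pyRange 0 (PySem.List.len (PySem.List.slice data (some st.1) (some (st.1 + (PySem.List.len p) * (l:Int))))) (l:Int)).foldl
          (fun acc index => acc ++ [PySem.Str.join "" (PySem.List.slice (PySem.List.slice data (some st.1) (some (st.1 + (PySem.List.len p) * (l:Int)))) (some index) (some (index + (l:Int))))]) st.2))
      (((l*m : Nat) : Int), (List.range (min m ((data.length + l - 1)/l))).map (pvChunk data l))).2
    = (List.range (min (m + (ps.map List.length).sum) ((data.length + l - 1)/l))).map (pvChunk data l) := by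
  induction ps with
  | nil => intro m; simp
  | cons p ps ih =>
    intro m
    simp only [List.foldl_cons]
    rw [pv_A_step data l hl p m, pv_A_start l m p]
    have h := ih (m + p.length)
    rw [h]
    have : m + p.length + (ps.map List.length).sum = m + ((p :: ps).map List.length).sum := by
      simp; omega
    rw [this]

-- ===== VERDICT (by name: the statement is the Claim_ definition above) =====
theorem get_data_rows_spec : Claim_equal_get_data_rows := by
  intro data time_prns num_of_obs _
  unfold Spec_get_data_rows
  obtain ⟨hl, hlen⟩ := pv_len_b num_of_obs
  set l := get_length_b num_of_obs with hldef
  simp only [get_data_rows, get_data_rows_alt, PySem.Dict.values_mk]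
  rw [← hlen]
  have h0 : ((0:Int), ([]:List String))
      = (((l*0 : Nat) : Int), (List.range (min 0 ((data.length + l - 1)/l))).map (pvChunk data l)) := by
    simp
  rw [h0, pv_A_loop data l hl (time_prns.map (fun x => x.2)) 0]
  have hB := pv_B_chunks l hl data ((time_prns.map (fun x => x.2)).map List.length).sum 0
  simp only [Nat.mul_zero, Nat.sub_zero, Nat.zero_add] at hB ⊢
  rw [hB]
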